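-- pv_equiv track=rewrite | github.com/lmisselyn/LINGI2364-Pattern-Mining | p2-sequence/helper.py | check_presence
-- ===== SOURCE A (Python) =====
-- def check_presence(pattern, transactions):
--     """
--     Return a list for the presence of the pattern in each transaction
--     1 - pattern present in the transaction
--     0 - pattern not present
--     """
--     pres = []
--     for transaction in transactions:
--         i = 0
--         for element in pattern:
--             if element not in transaction[i:]:
--                 # not present
--                 pres.append(0)
--                 break
--             # do the search from index i
--             i = transaction.index(element, i) + 1
--         else:
--             # the pattern is present
--             pres.append(1)
--     return pres
-- ===== SOURCE B (Python) =====
-- def check_presence(pattern, transactions):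
--     """
--     Return a list for the presence of the pattern in each transaction
--     1 - pattern present in the transaction
--     0 - pattern not present
--     """
--     pres = []
--     for transaction in transactions:
--         # occurrence index: value -> sorted list of positions (built in one pass)
--         pos = {}
--         for idx, v in enumerate(transaction):
--             pos.setdefault(v, []).append(idx)
--         cur = -1
--         ok = 1
--         for e in pattern:
--             lst = pos.get(e, [])
--             # binary search for the first position strictly greater than cur
--             lo, hi = 0, len(lst)
--             while lo < hi:
--                 mid = (lo + hi) // 2
--                 if lst[mid] > cur:
--                     hi = mid
--                 else:
--                     lo = mid + 1
--             if lo == len(lst):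
--                 ok = 0
--                 break
--             cur = lst[lo]
--         pres.append(ok)
--     return pres
-- ===== Notes on version B (the rewrite author's own statement) =====
-- stated objective: alternative
-- what changed: Replaces A's per-element slice + list.index rescans with a per-transaction occurrence index (dict value -> sorted position list built in one pass) queried by binary search for the first position past the previous match: O(n + m log n) per transaction vs A's O(m*n) worst case, though A's C-level scans can win on some shapes, so no speed is claimed.
import Mathlib
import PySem

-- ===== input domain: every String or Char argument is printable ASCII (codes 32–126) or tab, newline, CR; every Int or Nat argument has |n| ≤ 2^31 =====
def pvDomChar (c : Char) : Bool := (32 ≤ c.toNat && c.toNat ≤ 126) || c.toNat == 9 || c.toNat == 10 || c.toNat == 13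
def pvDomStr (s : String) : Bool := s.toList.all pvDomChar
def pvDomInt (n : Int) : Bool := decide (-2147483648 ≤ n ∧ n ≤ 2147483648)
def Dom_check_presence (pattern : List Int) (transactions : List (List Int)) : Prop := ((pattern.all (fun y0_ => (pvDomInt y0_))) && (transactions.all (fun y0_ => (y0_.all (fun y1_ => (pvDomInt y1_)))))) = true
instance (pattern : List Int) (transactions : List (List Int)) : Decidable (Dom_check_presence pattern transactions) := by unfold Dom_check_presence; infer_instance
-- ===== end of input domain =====

-- B replaces A's slice + list.index rescans with a per-transaction occurrence index (value -> sorted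
-- position list) queried by binary search (alternative algorithm; no speed claim).

-- ===== PORT A =====
-- A's inner 'for element in pattern' loop with running start index i; the for/else appends 1 only
-- when no break occurred. transaction.index(element, i) = i + first index of element in transaction[i:]
-- (exact since i ≥ 0 and membership in the slice was just checked).
def pvLoopA (transaction : List Int) : List Int → Nat → Int
  | [], _ => 1
  | e :: rest, i =>
    let suf := PySem.List.slice transaction (some (i : Int)) none
    if e ∈ suf then
      match PySem.List.index? suf e with
      | some k => pvLoopA transaction rest (i + k + 1)
      | none => 0   -- unreachable: e ∈ suf
    else 0

def check_presence (pattern : List Int) (transactions : List (List Int)) : List Int :=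
  transactions.foldl (fun pres transaction => pres ++ [pvLoopA transaction pattern 0]) []

-- ===== PORT B =====
-- B's occurrence-index build: for idx, v in enumerate(transaction): pos.setdefault(v, []).append(idx)
-- (= pos[v] = pos.get(v, []) + [idx], keeping the key's dict position: Dict.modify).
def pvBuildPos (t : List Int) : PySem.Dict Int (List Int) :=
  (t.zipIdx.map (fun p => (p.1, (p.2 : Int)))).foldl
    (fun d p => d.modify p.1 [] (· ++ [p.2])) PySem.Dict.empty

-- B's while-loop binary search: first index lo in [lo, hi) with lst[lo] > cur (mid is always in range,
-- so lst[mid] is read with getD).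
def pvBisect (lst : List Int) (cur : Int) (lo hi : Nat) : Nat :=
  if lo < hi then
    let mid := (lo + hi) / 2
    if cur < lst.getD mid 0 then pvBisect lst cur lo mid
    else pvBisect lst cur (mid + 1) hi
  else lo
termination_by hi - lo

-- B's 'for e in pattern' loop with the last matched position cur (initially -1); break sets ok = 0.
-- 'cur = lst[lo]' has lo < len(lst), read with getD.
def pvLoopB (pos : PySem.Dict Int (List Int)) : List Int → Int → Int
  | [], _ => 1
  | e :: rest, cur =>
    let lst := pos.getD e []
    let lo := pvBisect lst cur 0 lst.length
    if lo = lst.length then 0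
    else pvLoopB pos rest (lst.getD lo 0)

def check_presence_alt (pattern : List Int) (transactions : List (List Int)) : List Int :=
  transactions.foldl (fun pres t => pres ++ [pvLoopB (pvBuildPos t) pattern (-1)]) []

-- ===== PRECONDITION & SPEC =====
def Spec_check_presence (pattern : List Int) (transactions : List (List Int)) (out : List Int) : Prop := out = check_presence_alt pattern transactions
instance (pattern : List Int) (transactions : List (List Int)) (out : List Int) : Decidable (Spec_check_presence pattern transactions out) := by unfold Spec_check_presence; infer_instance

-- ===== CLAIM (what is proved, stated in full; the proofs are below) =====
def Claim_equal_check_presence : Prop := ∀ (pattern : List Int) (transactions : List (List Int)), Dom_check_presence pattern transactions → Spec_check_presence pattern transactions (check_presence pattern transactions)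

-- ===== LEMMAS AND PROOFS =====

-- Proof-side greedy subsequence spec both ports are reduced to.
def pvConsume (e : Int) : List Int → Option (List Int)
  | [] => none
  | x :: xs => if x = e then some xs else pvConsume e xs

def pvAllIn : List Int → List Int → Bool
  | [], _ => true
  | e :: rest, it =>
    match pvConsume e it with
    | some it' => pvAllIn rest it'
    | none => false

theorem pvConsume_eq_index (e : Int) (s : List Int) :
    pvConsume e s = (PySem.List.index? s e).map (fun k => s.drop (k + 1)) := by
  induction s with
  | nil => simp [pvConsume, PySem.List.index?]
  | cons x xs ih =>
    by_cases h : x = e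
    · subst h
      rw [PySem.List.index?_cons_self]
      simp [pvConsume]
    · rw [PySem.List.index?_cons_of_ne xs h]
      simp only [pvConsume, if_neg h, ih, Option.map_map]
      cases hk : PySem.List.index? xs e <;> simp

theorem pvLoopA_eq_allIn (t : List Int) (pat : List Int) (i : Nat) :
    pvLoopA t pat i = if pvAllIn pat (t.drop i) then 1 else 0 := by
  induction pat generalizing i with
  | nil => simp [pvLoopA, pvAllIn]
  | cons e rest ih =>
    rw [pvLoopA, PySem.List.slice_from_natCast]
    show (if e ∈ t.drop i then _ else _) = _
    by_cases hm : e ∈ t.drop i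
    · rw [if_pos hm]
      rcases hk : PySem.List.index? (t.drop i) e with _ | k
      · exact (((PySem.List.index?_eq_none_iff _ _).mp hk) hm).elim
      · have hc : pvConsume e (t.drop i) = some ((t.drop i).drop (k + 1)) := by
          rw [pvConsume_eq_index, hk]; rfl
        simp only [pvAllIn, hc, ih, List.drop_drop]
        rw [Nat.add_assoc]
    · rw [if_neg hm]
      have hn : PySem.List.index? (t.drop i) e = none := (PySem.List.index?_eq_none_iff _ _).mpr hm
      have hc : pvConsume e (t.drop i) = none := by rw [pvConsume_eq_index, hn]; rfl
      simp [pvAllIn, hc]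

-- The positions list stored for e: indices of the occurrences of e, in order, with offset k.
def pvPos (e : Int) : List Int → Nat → List Int
  | [], _ => []
  | x :: xs, k => (if x = e then [(k : Int)] else []) ++ pvPos e xs (k + 1)

theorem pvBuildPos_getD (t : List Int) (e : Int) :
    (pvBuildPos t).getD e [] = pvPos e t 0 := by
  unfold pvBuildPos
  rw [PySem.Dict.getD_foldl_modify_append, PySem.Dict.getD_empty]
  show (((t.zipIdx.map (fun p => (p.1, (p.2 : Int)))).filter (fun p => p.1 == e)).map (·.2)) = _
  have h : ∀ (s : List Int) (k : Nat),
      ((((s.zipIdx k).map (fun p => (p.1, (p.2 : Int)))).filter (fun p => p.1 == e)).map (·.2))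
        = pvPos e s k := by
    intro s
    induction s with
    | nil => intro k; simp [pvPos]
    | cons x xs ih =>
      intro k
      rw [List.zipIdx_cons]
      by_cases hx : x = e <;> simp [pvPos, hx, ih (k + 1)]
  exact h t 0

theorem pvPos_mem_bounds (e : Int) (s : List Int) (k : Nat) :
    ∀ x ∈ pvPos e s k, (k : Int) ≤ x ∧ x < (k : Int) + s.length := by
  induction s generalizing k with
  | nil => simp [pvPos]
  | cons y ys ih =>
    intro x hx
    rw [pvPos, List.mem_append] at hx
    have hlen : ((y :: ys).length : Int) = (ys.length : Int) + 1 := by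
      simp [List.length_cons]
    rcases hx with hx | hx
    · have hx' : x = (k : Int) := by
        by_cases hy : y = e
        · rw [if_pos hy] at hx; simpa using hx
        · rw [if_neg hy] at hx; simp at hx
      rw [hlen, hx']
      constructor
      · omega
      · have : (0 : Int) ≤ (ys.length : Int) := by positivity
        omega
    · obtain ⟨h1, h2⟩ := ih (k + 1) x hx
      rw [hlen]
      push_cast at h1 h2 ⊢
      omega

theorem pvPos_sorted (e : Int) (s : List Int) (k : Nat) :
    (pvPos e s k).Pairwise (· < ·) := by
  induction s generalizing k with
  | nil => simp [pvPos]
  | cons y ys ih =>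
    rw [pvPos, List.pairwise_append]
    refine ⟨?_, ih (k + 1), ?_⟩
    · split <;> simp
    · intro a ha b hb
      have hb' := (pvPos_mem_bounds e ys (k + 1) b hb).1
      have ha' : a = (k : Int) := by
        by_cases hy : y = e
        · rw [if_pos hy] at ha; simpa using ha
        · rw [if_neg hy] at ha; simp at ha
      push_cast at hb'
      omega

theorem pvPos_nil_iff (e : Int) (s : List Int) (k : Nat) :
    pvPos e s k = [] ↔ e ∉ s := by
  induction s generalizing k with
  | nil => simp [pvPos]
  | cons y ys ih =>
    rw [pvPos]
    by_cases hy : y = e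
    · subst hy
      simp
    · simp only [if_neg hy, List.nil_append, ih (k + 1), List.mem_cons]
      constructor
      · intro h hc
        rcases hc with hc | hc
        · exact hy hc.symm
        · exact h hc
      · intro h hc
        exact h (Or.inr hc)

theorem pvPos_split (e : Int) (s : List Int) (k m : Nat) :
    pvPos e s k = pvPos e (s.take m) k ++ pvPos e (s.drop m) (k + m) := by
  induction s generalizing k m with
  | nil => simp [pvPos]
  | cons y ys ih =>
    cases m with
    | zero => simp [pvPos]
    | succ m' =>
      simp only [List.take_succ_cons, List.drop_succ_cons, pvPos, List.append_assoc]
      rw [ih (k + 1) m']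
      have : k + 1 + m' = k + (m' + 1) := by omega
      rw [this]

theorem pvPos_head (e : Int) (s : List Int) (k : Nat) :
    (pvPos e s k).head? = (PySem.List.index? s e).map (fun j => (k : Int) + j) := by
  induction s generalizing k with
  | nil => simp [pvPos, PySem.List.index?]
  | cons y ys ih =>
    by_cases hy : y = e
    · subst hy
      rw [PySem.List.index?_cons_self]
      simp [pvPos]
    · rw [PySem.List.index?_cons_of_ne ys hy]
      simp only [pvPos, if_neg hy, List.nil_append, ih (k + 1)]
      cases PySem.List.index? ys e with
      | none => simp
      | some j =>
        simp
        omega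

-- Binary search: on a (≤)-sorted list it returns, between correct bounds, the boundary index.
theorem pvBisect_spec (lst : List Int) (cur : Int) (hs : lst.Pairwise (· ≤ ·)) :
    ∀ fuel lo hi, hi - lo ≤ fuel → lo ≤ hi → hi ≤ lst.length →
    (∀ i, i < lo → lst.getD i 0 ≤ cur) →
    (∀ i, hi ≤ i → i < lst.length → cur < lst.getD i 0) →
    lo ≤ pvBisect lst cur lo hi ∧ pvBisect lst cur lo hi ≤ hi ∧
    (∀ i, i < pvBisect lst cur lo hi → lst.getD i 0 ≤ cur) ∧
    (∀ i, pvBisect lst cur lo hi ≤ i → i < lst.length → cur < lst.getD i 0) := by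
  have hget : ∀ i j, i ≤ j → j < lst.length → lst.getD i 0 ≤ lst.getD j 0 := by
    intro i j hij hj
    rw [List.getD_eq_getElem _ _ (by omega), List.getD_eq_getElem _ _ hj]
    rcases Nat.eq_or_lt_of_le hij with h | h
    · subst h; rfl
    · exact (List.pairwise_iff_getElem.mp hs) i j (by omega) hj h
  intro fuel
  induction fuel with
  | zero =>
    intro lo hi hf hlh hhl h1 h2
    have heq : lo = hi := by omega
    subst heq
    rw [pvBisect, if_neg (lt_irrefl lo)]
    exact ⟨le_refl _, le_refl _, h1, h2⟩
  | succ f ihf =>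
    intro lo hi hf hlh hhl h1 h2
    rw [pvBisect]
    by_cases hlt : lo < hi
    · rw [if_pos hlt]
      have hmid2 : (lo + hi) / 2 < hi := by omega
      have hmidlen : (lo + hi) / 2 < lst.length := by omega
      by_cases hc : cur < lst.getD ((lo + hi) / 2) 0
      · rw [if_pos hc]
        obtain ⟨g1, g2, g3, g4⟩ := ihf lo ((lo + hi) / 2) (by omega) (by omega) (by omega) h1
          (fun i hi1 hi2 => lt_of_lt_of_le hc (hget _ _ hi1 hi2))
        exact ⟨g1, by omega, g3, g4⟩
      · rw [if_neg hc]
        push_neg at hc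
        obtain ⟨g1, g2, g3, g4⟩ := ihf ((lo + hi) / 2 + 1) hi (by omega) (by omega) hhl
          (fun i hi1 => by
            rcases Nat.lt_or_ge i lo with h | h
            · exact h1 i h
            · exact le_trans (hget i ((lo + hi) / 2) (by omega) hmidlen) hc) h2
        exact ⟨by omega, g2, g3, g4⟩
    · rw [if_neg hlt]
      have heq : lo = hi := by omega
      subst heq
      exact ⟨le_refl _, le_refl _, h1, h2⟩

-- One step of B's pattern loop, phrased against the greedy spec.
theorem pvLoopB_eq (t : List Int) (pat : List Int) (cur : Int) (hc : -1 ≤ cur) :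
    pvLoopB (pvBuildPos t) pat cur = if pvAllIn pat (t.drop (cur + 1).toNat) then 1 else 0 := by
  induction pat generalizing cur with
  | nil => simp [pvLoopB, pvAllIn]
  | cons e rest ih =>
    rw [pvLoopB]
    simp only [pvBuildPos_getD]
    set lst := pvPos e t 0 with hlst
    set n := (cur + 1).toNat with hn
    have hcur : (n : Int) = cur + 1 := by omega
    have hsplit : lst = pvPos e (t.take n) 0 ++ pvPos e (t.drop n) n := by
      rw [hlst, pvPos_split e t 0 n]; simp
    have hub : ∀ x ∈ pvPos e (t.take n) 0, x ≤ cur := by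
      intro x hx
      have h2 := (pvPos_mem_bounds e (t.take n) 0 x hx).2
      have hlen : ((t.take n).length : Int) ≤ (n : Int) := by
        have := List.length_take_le n t
        exact_mod_cast this
      push_cast at h2
      omega
    have hlb : ∀ x ∈ pvPos e (t.drop n) n, cur < x := by
      intro x hx
      have := (pvPos_mem_bounds e (t.drop n) n x hx).1
      omega
    set L1 := (pvPos e (t.take n) 0).length with hL1
    have hsorted : lst.Pairwise (· ≤ ·) :=
      (pvPos_sorted e t 0).imp (fun h => le_of_lt h)
    obtain ⟨hr1, hr2, hr3, hr4⟩ := pvBisect_spec lst cur hsorted (lst.length) 0 lst.length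
      (by omega) (by omega) (le_refl _) (by omega) (by omega)
    set r := pvBisect lst cur 0 lst.length with hr
    have hlenlst : lst.length = L1 + (pvPos e (t.drop n) n).length := by
      rw [hsplit, List.length_append]
    have hrL1 : r = L1 := by
      by_contra hne
      rcases Nat.lt_or_ge r L1 with h | h
      · have hrlen : r < lst.length := by omega
        have hmem : lst.getD r 0 ∈ pvPos e (t.take n) 0 := by
          rw [hsplit, List.getD_append _ _ _ _ (by omega)]
          have hr' : r < (pvPos e (t.take n) 0).length := by omega
          rw [List.getD_eq_getElem _ _ hr']
          exact List.getElem_mem _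
        have h1 := hub _ hmem
        have h2 := hr4 r (le_refl _) hrlen
        omega
      · have h' : L1 < r := by omega
        have hL1len : L1 < lst.length := by omega
        have hmem : lst.getD L1 0 ∈ pvPos e (t.drop n) n := by
          rw [hsplit, List.getD_append_right _ _ _ _ (by omega), hL1, Nat.sub_self]
          have hnn : pvPos e (t.drop n) n ≠ [] := by
            intro hcon
            rw [hcon] at hlenlst
            simp at hlenlst
            omega
          obtain ⟨hd0, tl0, hdt0⟩ := List.exists_cons_of_ne_nil hnn
          rw [hdt0]
          simp
        have h1 := hlb _ hmem
        have h2 := hr3 L1 h'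
        omega
    by_cases hend : r = lst.length
    · rw [if_pos hend]
      have hz : (pvPos e (t.drop n) n).length = 0 := by omega
      have hempty : pvPos e (t.drop n) n = [] := List.length_eq_zero_iff.mp hz
      have hnot : e ∉ t.drop n := (pvPos_nil_iff e (t.drop n) n).mp hempty
      have hcons : pvConsume e (t.drop n) = none := by
        rw [pvConsume_eq_index, (PySem.List.index?_eq_none_iff _ _).mpr hnot]; rfl
      simp [pvAllIn, hcons]
    · rw [if_neg hend]
      have hrlen : r < lst.length := by omega
      have hne : (pvPos e (t.drop n) n) ≠ [] := by
        intro hcon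
        rw [hcon] at hlenlst
        simp at hlenlst
        omega
      obtain ⟨hd, tl, hdt⟩ := List.exists_cons_of_ne_nil hne
      have hget : lst.getD r 0 = hd := by
        rw [hsplit, hrL1, List.getD_append_right _ _ _ _ (by omega), hL1, Nat.sub_self, hdt]
        rfl
      have hhead : (pvPos e (t.drop n) n).head? = some hd := by rw [hdt]; rfl
      rw [pvPos_head] at hhead
      rcases hk : PySem.List.index? (t.drop n) e with _ | k
      · rw [hk] at hhead; simp at hhead
      · rw [hk] at hhead
        simp at hhead
        have hhd : hd = (n : Int) + k := by omega
        have hcons : pvConsume e (t.drop n) = some ((t.drop n).drop (k + 1)) := by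
          rw [pvConsume_eq_index, hk]; rfl
        have hnext : -1 ≤ lst.getD r 0 := by rw [hget, hhd]; omega
        rw [ih _ hnext]
        have harith : ((lst.getD r 0) + 1).toNat = n + (k + 1) := by
          rw [hget, hhd]; omega
        simp only [pvAllIn, hcons, harith, List.drop_drop]

-- ===== VERDICT (by name: the statement is the Claim_ definition above) =====
theorem check_presence_spec : Claim_equal_check_presence := by
  intro pattern transactions _
  unfold Spec_check_presence check_presence check_presence_alt
  rw [PySem.List.foldl_append_singleton_eq_map, PySem.List.foldl_append_singleton_eq_map]
  refine List.map_congr_left (fun t _ => ?_)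
  rw [pvLoopA_eq_allIn t pattern 0, pvLoopB_eq t pattern (-1) (by omega)]
  norm_num
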